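-- pv_equiv track=rewrite | github.com/riki95/social-networks-anonymization | main.py | eq_class
-- ===== SOURCE A (Python) =====
-- def eq_class(hi_dict: dict):
--     eq_class = {}
--     for key, degrees in hi_dict.items():
--         k = tuple(sorted(degrees))
--
--         if k not in eq_class:
--             eq_class[k] = [] # Initialize the value field for that empty key
--
--         eq_class[k].append(key)
--
--     return eq_class
-- ===== SOURCE B (Python) =====
-- def eq_class(hi_dict: dict):
--     # Two-phase decomposition: canonicalize every entry once, dedupe the
--     # canonical keys in first-occurrence order, then build each class by a
--     # single comprehension over the zipped (key, canonical) pairs.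
--     keys = list(hi_dict)
--     canon = [tuple(sorted(d)) for d in hi_dict.values()]
--     seen = list(dict.fromkeys(canon))
--     return {c: [k for k, cc in zip(keys, canon) if cc == c] for c in seen}
-- ===== Notes on version B (the rewrite author's own statement) =====
-- stated objective: alternative
-- what changed: Replaces A's single pass that mutates a dict of lists entry by entry with a two-phase decomposition: compute all canonical (sorted-degree) keys up front, dedupe them in first-occurrence order, then build each class in one comprehension over the zipped (key, canonical) pairs.
import Mathlib
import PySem

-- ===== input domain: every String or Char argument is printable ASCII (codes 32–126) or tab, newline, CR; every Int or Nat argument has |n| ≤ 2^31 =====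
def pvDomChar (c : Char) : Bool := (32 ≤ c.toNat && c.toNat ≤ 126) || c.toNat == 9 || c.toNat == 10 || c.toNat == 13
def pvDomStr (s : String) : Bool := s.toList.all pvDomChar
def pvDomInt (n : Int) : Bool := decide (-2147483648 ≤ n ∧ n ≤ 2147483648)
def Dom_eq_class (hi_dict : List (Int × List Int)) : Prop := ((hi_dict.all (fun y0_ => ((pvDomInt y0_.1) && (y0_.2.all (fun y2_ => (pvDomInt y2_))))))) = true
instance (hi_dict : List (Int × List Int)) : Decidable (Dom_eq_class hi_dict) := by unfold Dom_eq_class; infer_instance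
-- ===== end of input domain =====

-- B replaces A's single mutating-dict pass by a two-phase decomposition
-- (canonicalize all entries, dedupe canonical keys, build each class by one
-- comprehension); objective: alternative, not faster (per-class scan is O(g*n)).

-- ===== PORT A =====
-- one iteration of A's loop body
def eqClassStepA (d : PySem.Dict (List Int) (List Int)) (kv : Int × List Int) :
    PySem.Dict (List Int) (List Int) :=
  let k := PySem.List.sorted kv.2 (fun x => x) false
  let d := if d.contains k = false then d.insert k [] else d
  -- eq_class[k].append(key): k is present here, so modify with default [] is exact
  d.modify k [] (fun l => l ++ [kv.1])

def eq_class (hi_dict : List (Int × List Int)) : List (List Int × List Int) :=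
  (hi_dict.foldl eqClassStepA PySem.Dict.empty).items

-- ===== PORT B =====
def eq_class_alt (hi_dict : List (Int × List Int)) : List (List Int × List Int) :=
  let keys := hi_dict.map Prod.fst
  let canon := hi_dict.map (fun kv => PySem.List.sorted kv.2 (fun x => x) false)
  let seen := PySem.List.dedup canon
  seen.map (fun c => (c, ((keys.zip canon).filter (fun p => p.2 == c)).map Prod.fst))

-- ===== PRECONDITION & SPEC =====
def Spec_eq_class (hi_dict : List (Int × List Int)) (out : List (List Int × List Int)) : Prop := out = eq_class_alt hi_dict
instance (hi_dict : List (Int × List Int)) (out : List (List Int × List Int)) : Decidable (Spec_eq_class hi_dict out) := by unfold Spec_eq_class; infer_instance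

-- ===== CLAIM (what is proved, stated in full; the proofs are below) =====
def Claim_equal_eq_class : Prop := ∀ (hi_dict : List (Int × List Int)), Dom_eq_class hi_dict → Spec_eq_class hi_dict (eq_class hi_dict)

-- ===== LEMMAS AND PROOFS =====

def eqKey (kv : Int × List Int) : List Int := PySem.List.sorted kv.2 (fun x => x) false

-- keys of A's loop: each step adds the canonical key (set semantics)
theorem keys_stepA (d : PySem.Dict (List Int) (List Int)) (kv : Int × List Int) :
    (eqClassStepA d kv).keys = PySem.Set.add d.keys (eqKey kv) := by
  unfold eqClassStepA eqKey
  by_cases h : d.contains (PySem.List.sorted kv.2 (fun x => x) false) = false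
  · have hm : (PySem.List.sorted kv.2 (fun x => x) false) ∉ d.keys := fun hc =>
      absurd ((PySem.Dict.contains_iff_mem_keys d _).mpr hc) (by simp [h])
    simp only [h, if_pos]
    rw [PySem.Dict.keys_modify, PySem.Dict.keys_insert_of_contains _ _
      (PySem.Dict.contains_insert_self _ _ _),
      PySem.Dict.keys_insert_of_not_contains _ _ h]
    simp [PySem.Set.add, PySem.Set.contains, hm]
  · have hm : (PySem.List.sorted kv.2 (fun x => x) false) ∈ d.keys :=
      (PySem.Dict.contains_iff_mem_keys d _).mp (by simpa using h)
    simp only [h]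
    rw [PySem.Dict.keys_modify,
      PySem.Dict.keys_insert_of_contains _ _ (by simpa using h)]
    simp [PySem.Set.add, PySem.Set.contains, hm]

theorem keys_foldl_stepA (l : List (Int × List Int)) (d : PySem.Dict (List Int) (List Int)) :
    (l.foldl eqClassStepA d).keys = PySem.Set.update d.keys (l.map eqKey) := by
  induction l generalizing d with
  | nil => simp [PySem.Set.update_nil]
  | cons kv rest ih =>
    rw [List.foldl_cons, ih, keys_stepA, List.map_cons, PySem.Set.update_cons]

-- value at c of A's loop: the keys of all entries whose canonical key is c, appended in order
theorem getD_stepA (d : PySem.Dict (List Int) (List Int)) (kv : Int × List Int) (c : List Int) :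
    (eqClassStepA d kv).getD c [] =
      d.getD c [] ++ (if c = eqKey kv then [kv.1] else []) := by
  unfold eqClassStepA eqKey
  by_cases h : d.contains (PySem.List.sorted kv.2 (fun x => x) false) = false
  · simp only [h, if_pos]
    by_cases hc : c = PySem.List.sorted kv.2 (fun x => x) false
    · simp [PySem.Dict.getD_modify, PySem.Dict.getD_insert, hc,
        PySem.Dict.getD_of_not_contains _ _ h]
    · simp [PySem.Dict.getD_modify, PySem.Dict.getD_insert, hc]
  · simp only [h]
    by_cases hc : c = PySem.List.sorted kv.2 (fun x => x) false
    · simp [PySem.Dict.getD_modify, hc]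
    · simp [PySem.Dict.getD_modify, hc]

theorem getD_foldl_stepA (l : List (Int × List Int)) (d : PySem.Dict (List Int) (List Int))
    (c : List Int) :
    (l.foldl eqClassStepA d).getD c [] =
      d.getD c [] ++ (l.filter (fun kv => eqKey kv == c)).map Prod.fst := by
  induction l generalizing d with
  | nil => simp
  | cons kv rest ih =>
    rw [List.foldl_cons, ih, getD_stepA, List.filter_cons]
    by_cases hc : c = eqKey kv
    · simp [hc, List.append_assoc]
    · have : (eqKey kv == c) = false := by simpa using Ne.symm hc
      simp [hc, this]

theorem eq_class_eq_alt (hi_dict : List (Int × List Int)) :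
    eq_class hi_dict = eq_class_alt hi_dict := by
  unfold eq_class eq_class_alt
  have hkeys : (hi_dict.foldl eqClassStepA PySem.Dict.empty).keys =
      PySem.Set.ofList (hi_dict.map eqKey) := by
    rw [keys_foldl_stepA]
    simp [PySem.Dict.keys_empty, PySem.Set.update_nil_left]
  have hnd : (hi_dict.foldl eqClassStepA PySem.Dict.empty).keys.Nodup := by
    rw [hkeys]; exact PySem.Set.nodup_ofList _
  rw [PySem.Dict.items_eq_map_keys _ hnd ([] : List Int), hkeys]
  dsimp only
  rw [List.zip_map', PySem.List.dedup_eq_ofList]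
  show (PySem.Set.ofList (hi_dict.map eqKey)).map _ = (PySem.Set.ofList (hi_dict.map _)).map _
  apply List.map_congr_left
  intro c _
  rw [getD_foldl_stepA]
  simp only [PySem.Dict.getD_empty, List.nil_append, List.filter_map, List.map_map]
  rfl

-- ===== VERDICT (by name: the statement is the Claim_ definition above) =====
theorem eq_class_spec : Claim_equal_eq_class := by
  intro hi_dict _
  unfold Spec_eq_class
  exact eq_class_eq_alt hi_dict
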